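-- pv_equiv track=rewrite | github.com/Jackson-Vieira/12-PM | CodeSignal/Introduction/All Longest Strings.py | solution
-- ===== SOURCE A (Python) =====
-- def solution(arr):
--     new_list = []
--     best = 0
--     for elm in arr:
--         aux = len(elm)
--         if aux > best:
--             best = aux
--             new_list = []
--             new_list.append(elm)
--
--         elif aux == best:
--             new_list.append(elm)
--
--     return new_list
-- ===== SOURCE B (Python) =====
-- def solution(arr):
--     best = max((len(x) for x in arr), default=0)
--     return [x for x in arr if len(x) == best]
-- ===== Notes on version B (the rewrite author's own statement) =====
-- stated objective: simpler
-- what changed: Replaced the interleaved running-max-and-rebuild loop with two plain passes: compute the maximum length (default 0) and filter the strings of that length.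
import Mathlib
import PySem

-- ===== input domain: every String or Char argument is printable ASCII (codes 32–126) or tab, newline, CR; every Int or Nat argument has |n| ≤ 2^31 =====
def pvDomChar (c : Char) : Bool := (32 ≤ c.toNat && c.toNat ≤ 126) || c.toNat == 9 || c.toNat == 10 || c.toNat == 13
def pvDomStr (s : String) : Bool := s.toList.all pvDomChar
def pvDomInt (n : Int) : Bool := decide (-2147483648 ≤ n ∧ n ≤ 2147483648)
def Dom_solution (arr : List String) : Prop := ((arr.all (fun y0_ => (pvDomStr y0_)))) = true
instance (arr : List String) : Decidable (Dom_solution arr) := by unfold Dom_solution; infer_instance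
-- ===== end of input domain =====

-- B replaces A's interleaved running-max-and-rebuild loop by two plain passes
-- (max length, then filter); objective: simpler.

-- ===== PORT A =====
-- one loop step of A's for-loop: state = (new_list, best)
def solutionStep (st : List String × Int) (elm : String) : List String × Int :=
  let aux : Int := PySem.Str.len elm
  if aux > st.2 then ([elm], aux)
  else if aux = st.2 then (st.1 ++ [elm], st.2)
  else st

def solution (arr : List String) : List String :=
  (arr.foldl solutionStep ([], 0)).1

-- ===== PORT B =====
def solution_alt (arr : List String) : List String :=
  let best : Int := arr.foldl (fun m x => max m (PySem.Str.len x)) 0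
  arr.filter (fun x => PySem.Str.len x == best)

-- ===== PRECONDITION & SPEC =====
def Spec_solution (arr : List String) (out : List String) : Prop := out = solution_alt arr
instance (arr : List String) (out : List String) : Decidable (Spec_solution arr out) := by unfold Spec_solution; infer_instance

-- ===== CLAIM (what is proved, stated in full; the proofs are below) =====
def Claim_equal_solution : Prop := ∀ (arr : List String), Dom_solution arr → Spec_solution arr (solution arr)

-- ===== LEMMAS AND PROOFS =====

-- final max dominates the starting accumulator
lemma foldMax_ge (arr : List String) (b : Int) :
    b ≤ arr.foldl (fun m x => max m (PySem.Str.len x)) b := by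
  induction arr generalizing b with
  | nil => simp
  | cons e t ih => exact le_trans (le_max_left _ _) (ih _)

-- A's fold computes (prefix-dependent list, running max); characterised against the final max
lemma foldA_char (arr : List String) (b : Int) (l : List String) :
    arr.foldl solutionStep (l, b) =
      ((if arr.foldl (fun m x => max m (PySem.Str.len x)) b > b then [] else l)
        ++ arr.filter (fun x => PySem.Str.len x == arr.foldl (fun m x => max m (PySem.Str.len x)) b),
       arr.foldl (fun m x => max m (PySem.Str.len x)) b) := by
  induction arr generalizing b l with
  | nil => simp
  | cons e t ih =>
    have hm := foldMax_ge t (max b (PySem.Str.len e))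
    simp only [List.foldl_cons, solutionStep, List.filter_cons]
    by_cases h1 : PySem.Str.len e > b
    · have hmax : max b (PySem.Str.len e) = PySem.Str.len e := max_eq_right (le_of_lt h1)
      rw [if_pos h1, ih]
      simp only [hmax] at hm ⊢
      by_cases h2 : t.foldl (fun m x => max m (PySem.Str.len x)) (PySem.Str.len e) > PySem.Str.len e
      · rw [if_pos h2, if_pos (lt_trans h1 h2)]
        have : (PySem.Str.len e == t.foldl (fun m x => max m (PySem.Str.len x)) (PySem.Str.len e)) = false := by
          simp only [beq_eq_false_iff_ne, ne_eq]; omega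
        rw [this]; simp
      · rw [if_neg h2]
        have heq : t.foldl (fun m x => max m (PySem.Str.len x)) (PySem.Str.len e) = PySem.Str.len e := le_antisymm (by omega) hm
        rw [if_pos (by omega : t.foldl (fun m x => max m (PySem.Str.len x)) (PySem.Str.len e) > b)]
        have : (PySem.Str.len e == t.foldl (fun m x => max m (PySem.Str.len x)) (PySem.Str.len e)) = true := by
          simp only [beq_iff_eq]; omega
        rw [this]; simp
    · rw [if_neg h1]
      have hmax : max b (PySem.Str.len e) = b := max_eq_left (by omega)
      simp only [hmax] at hm ⊢
      by_cases h2 : PySem.Str.len e = b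
      · rw [if_pos h2, ih]
        by_cases h3 : t.foldl (fun m x => max m (PySem.Str.len x)) b > b
        · rw [if_pos h3, if_pos h3]
          have : (PySem.Str.len e == t.foldl (fun m x => max m (PySem.Str.len x)) b) = false := by
            simp only [beq_eq_false_iff_ne, ne_eq]; omega
          rw [this]; simp
        · rw [if_neg h3, if_neg h3]
          have heq : t.foldl (fun m x => max m (PySem.Str.len x)) b = b := le_antisymm (by omega) hm
          have : (PySem.Str.len e == t.foldl (fun m x => max m (PySem.Str.len x)) b) = true := by
            simp only [beq_iff_eq]; omega
          rw [this]; simp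
      · rw [if_neg h2, ih]
        have : (PySem.Str.len e == t.foldl (fun m x => max m (PySem.Str.len x)) b) = false := by
          simp only [beq_eq_false_iff_ne, ne_eq]; omega
        rw [this]; simp

-- ===== VERDICT (by name: the statement is the Claim_ definition above) =====
theorem solution_spec : Claim_equal_solution := by
  intro arr _
  show solution arr = solution_alt arr
  unfold solution solution_alt
  rw [foldA_char]
  split <;> simp
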